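-- pv_equiv track=rewrite | github.com/code-10/JustBhutan | justbhutan/utility/response.py | convertListToJson
-- ===== SOURCE A (Python) =====
-- def convertListToJson(rows,keys):
--     dictionary = {}
--     listOfDictionary = [{}]
--     count=0
--     for i in rows:
--         for j in i:
--             dictionary[keys[count%len(keys)]]=j
--             count=count+1
--             length = len(keys)
--             if(count%length==0):
--                 listOfDictionary.append(dictionary.copy())
--                 dictionary.clear()
--     del listOfDictionary[0]
--     return listOfDictionary
-- ===== SOURCE B (Python) =====
-- def convertListToJson(rows, keys):
--     flat = [v for row in rows for v in row]
--     if not flat: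
--         return []
--     n = len(keys)
--     return [dict(zip(keys, flat[g*n:g*n+n])) for g in range(len(flat)//n)]
-- ===== Notes on version B (the rewrite author's own statement) =====
-- stated objective: simpler
-- what changed: Replaces the nested stateful loop (running dict, modular counter, append-on-boundary, sentinel first element deleted at the end) by flattening all values once and building each dict directly with dict(zip(keys, chunk)) over the complete keys-sized chunks.
import Mathlib
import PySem

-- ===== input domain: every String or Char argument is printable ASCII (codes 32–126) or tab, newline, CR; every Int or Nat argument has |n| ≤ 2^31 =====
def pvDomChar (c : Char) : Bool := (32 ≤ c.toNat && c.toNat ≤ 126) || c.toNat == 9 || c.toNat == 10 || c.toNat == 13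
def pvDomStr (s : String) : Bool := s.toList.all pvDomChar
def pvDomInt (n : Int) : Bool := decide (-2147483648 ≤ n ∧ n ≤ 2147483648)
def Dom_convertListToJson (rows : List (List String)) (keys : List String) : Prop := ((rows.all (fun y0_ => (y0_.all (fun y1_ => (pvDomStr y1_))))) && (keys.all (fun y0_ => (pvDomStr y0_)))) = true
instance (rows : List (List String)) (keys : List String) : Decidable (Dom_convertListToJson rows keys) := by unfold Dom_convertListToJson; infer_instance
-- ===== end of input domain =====

-- B replaces A's nested stateful loop (running dict, modular counter, append-on-boundary, sentinel
-- first element removed at the end) by flattening once and building each dict directly from the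
-- complete keys-sized chunks (objective: simpler); same return value wherever A returns.

-- ===== PORT A =====
-- one iteration of A's inner loop body over the state (dictionary, listOfDictionary, count):
-- keys[count % len(keys)] via PySem.Int.mod / pyGet? (in range whenever keys ≠ [], which Pre_
-- guarantees when the loop body runs); dictionary.copy() appended as its items snapshot,
-- dictionary.clear() = the empty dict
def aStep (keys : List String)
    (st : PySem.Dict String String × List (List (String × String)) × Int) (j : String) :
    PySem.Dict String String × List (List (String × String)) × Int :=
  if PySem.Int.mod (st.2.2 + 1) (keys.length : Int) == 0 then
    (PySem.Dict.empty,
     st.2.1 ++ [(st.1.insert ((PySem.List.pyGet? keys (PySem.Int.mod st.2.2 (keys.length : Int))).getD "") j).items],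
     st.2.2 + 1)
  else
    (st.1.insert ((PySem.List.pyGet? keys (PySem.Int.mod st.2.2 (keys.length : Int))).getD "") j,
     st.2.1, st.2.2 + 1)

def convertListToJson (rows : List (List String)) (keys : List String) :
    List (List (String × String)) :=
  -- for i in rows: for j in i: …; listOfDictionary starts as [{}]; 'del listOfDictionary[0]' = drop 1
  ((rows.foldl (fun st i => i.foldl (aStep keys) st)
      ((PySem.Dict.empty : PySem.Dict String String), [([] : List (String × String))], (0 : Int))).2.1).drop 1

-- ===== PORT B =====
-- dict(zip(keys, vals)) as an insert-fold over the zipped pairs, returned as its items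
def mkDictB (keys vals : List String) : List (String × String) :=
  ((keys.zip vals).foldl (fun d kv => d.insert kv.1 kv.2)
    (PySem.Dict.empty : PySem.Dict String String)).items

def convertListToJson_alt (rows : List (List String)) (keys : List String) :
    List (List (String × String)) :=
  let flat := rows.flatMap (fun row => row)
  if flat = [] then []
  else
    let n : Int := (keys.length : Int)
    (PySem.List.pyRange 0 (PySem.Int.floordiv (flat.length : Int) n) 1).map
      (fun g => mkDictB keys (PySem.List.slice flat (some (g * n)) (some (g * n + n))))

-- ===== PRECONDITION & SPEC =====
-- Pre_ excludes exactly the inputs where the Python A raises ZeroDivisionError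
-- (keys == [] while some row element exists); the Python B raises there as well.
def Pre_convertListToJson (rows : List (List String)) (keys : List String) : Prop :=
  keys ≠ [] ∨ ∀ r ∈ rows, r = []
instance (rows : List (List String)) (keys : List String) : Decidable (Pre_convertListToJson rows keys) := by unfold Pre_convertListToJson; infer_instance

def pvWitness_convertListToJson : List (List String) × List String :=
  ([["a", "b"], ["c"]], ["x", "y"])

def Spec_convertListToJson (rows : List (List String)) (keys : List String) (out : List (List (String × String))) : Prop := out = convertListToJson_alt rows keys
instance (rows : List (List String)) (keys : List String) (out : List (List (String × String))) : Decidable (Spec_convertListToJson rows keys out) := by unfold Spec_convertListToJson; infer_instance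

-- ===== CLAIM (what is proved, stated in full; the proofs are below) =====
def Claim_equal_convertListToJson : Prop := ∀ (rows : List (List String)) (keys : List String), Dom_convertListToJson rows keys → Pre_convertListToJson rows keys → Spec_convertListToJson rows keys (convertListToJson rows keys)

-- ===== LEMMAS AND PROOFS =====

-- reference chunking: the dicts of the successive complete keys-length groups of flat
def chunksA (keys flat : List String) : List (List (String × String)) :=
  if h : keys ≠ [] ∧ keys.length ≤ flat.length then
    mkDictB keys (flat.take keys.length) :: chunksA keys (flat.drop keys.length)
  else []
  termination_by flat.length
  decreasing_by
    have hk : 0 < keys.length := List.length_pos_of_ne_nil h.1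
    simp only [List.length_drop]; omega

-- A's inner fold across (part of) one group: from count = q*n + t with t < n,
-- consuming vs with t + |vs| ≤ n
theorem aStep_group (keys : List String) (vs : List String) :
    ∀ (t : Nat) (d : PySem.Dict String String) (lod : List (List (String × String))) (q : Nat),
    t < keys.length → t + vs.length ≤ keys.length →
    vs.foldl (aStep keys) (d, lod, ((q * keys.length + t : Nat) : Int)) =
      if t + vs.length = keys.length
      then (PySem.Dict.empty,
            lod ++ [(((keys.drop t).zip vs).foldl (fun d kv => d.insert kv.1 kv.2) d).items],
            (((q + 1) * keys.length : Nat) : Int))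
      else ((((keys.drop t).zip vs).foldl (fun d kv => d.insert kv.1 kv.2) d),
            lod, ((q * keys.length + t + vs.length : Nat) : Int)) := by
  induction vs with
  | nil =>
    intro t d lod q ht hle
    rw [if_neg (by simp; omega)]
    simp
  | cons v rest ih =>
    intro t d lod q ht hle
    simp only [List.foldl_cons]
    have hidx : (PySem.List.pyGet? keys (PySem.Int.mod ((q * keys.length + t : Nat) : Int) (keys.length : Int))).getD "" = keys[t] := by
      rw [PySem.Int.mod_natCast, Nat.add_comm (q * keys.length) t, Nat.add_mul_mod_self_right, Nat.mod_eq_of_lt ht]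
      simp [PySem.List.pyGet?_natCast, List.getElem?_eq_getElem ht]
    have hc1 : ((q * keys.length + t : Nat) : Int) + 1 = ((q * keys.length + (t + 1) : Nat) : Int) := by push_cast; ring
    have hmod1 : PySem.Int.mod ((q * keys.length + (t + 1) : Nat) : Int) (keys.length : Int) = (((t + 1) % keys.length : Nat) : Int) := by
      rw [PySem.Int.mod_natCast, Nat.add_comm (q * keys.length) (t+1), Nat.add_mul_mod_self_right]
    have hstep : aStep keys (d, lod, ((q * keys.length + t : Nat) : Int)) v =
        if t + 1 = keys.length
        then (PySem.Dict.empty, lod ++ [(d.insert keys[t] v).items], ((q * keys.length + (t + 1) : Nat) : Int))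
        else (d.insert keys[t] v, lod, ((q * keys.length + (t + 1) : Nat) : Int)) := by
      by_cases h1 : t + 1 = keys.length
      · have hz : (t + 1) % keys.length = 0 := by rw [h1, Nat.mod_self]
        simp only [aStep, hc1, hmod1, hz, hidx, Nat.cast_zero, beq_self_eq_true, if_true, if_pos h1]
      · have hz : (t + 1) % keys.length ≠ 0 := by
          have := Nat.mod_eq_of_lt (show t + 1 < keys.length by omega); omega
        simp only [aStep, hc1, hmod1, hidx]
        have hz' : (((t + 1) % keys.length : Nat) : Int) ≠ 0 := by exact_mod_cast hz
        rw [if_neg (by simp only [beq_iff_eq]; exact hz'), if_neg h1]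
    rw [hstep]
    by_cases h1 : t + 1 = keys.length
    · have hrest : rest = [] := by
        have : rest.length = 0 := by simp at hle; omega
        exact List.eq_nil_of_length_eq_zero this
      subst hrest
      rw [if_pos h1, List.foldl_nil, if_pos (by simp; omega)]
      rw [List.drop_eq_getElem_cons ht]
      simp only [List.zip_cons_cons, List.zip_nil_right, List.foldl_cons, List.foldl_nil]
      simp only [Prod.mk.injEq, true_and]
      exact Nat.cast_inj.mpr (by rw [← h1]; ring)
    · rw [if_neg h1]
      rw [ih (t + 1) (d.insert keys[t] v) lod q (by omega) (by simp at hle ⊢; omega)]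
      rw [List.drop_eq_getElem_cons ht]
      simp only [List.zip_cons_cons, List.foldl_cons, List.length_cons]
      by_cases h2 : t + 1 + rest.length = keys.length
      · rw [if_pos h2, if_pos (by omega)]
      · rw [if_neg h2, if_neg (by omega)]
        simp only [Prod.mk.injEq, true_and]
        exact Nat.cast_inj.mpr (by ring)

theorem mainA (keys : List String) (hk : keys ≠ []) (flat : List String)
    (lod : List (List (String × String))) (q : Nat) :
    (flat.foldl (aStep keys) (PySem.Dict.empty, lod, ((q * keys.length : Nat) : Int))).2.1
      = lod ++ chunksA keys flat := by
  have hpos : 0 < keys.length := List.length_pos_of_ne_nil hk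
  by_cases h : keys.length ≤ flat.length
  · have hsplit : flat = flat.take keys.length ++ flat.drop keys.length :=
      (List.take_append_drop _ _).symm
    rw [chunksA]
    rw [dif_pos ⟨hk, h⟩]
    conv_lhs => rw [hsplit]
    rw [List.foldl_append]
    have hlen : (flat.take keys.length).length = keys.length := by
      simp [List.length_take]; omega
    have hg := aStep_group keys (flat.take keys.length) 0 PySem.Dict.empty lod q hpos (by omega)
    rw [show (q * keys.length + 0 : Nat) = q * keys.length by omega] at hg
    rw [hg, if_pos (by omega)]
    rw [mainA keys hk (flat.drop keys.length) _ (q + 1)]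
    simp [mkDictB, List.append_assoc]
  · rw [chunksA, dif_neg (by intro hc; exact h hc.2)]
    have hg := aStep_group keys flat 0 PySem.Dict.empty lod q hpos (by omega)
    rw [show (q * keys.length + 0 : Nat) = q * keys.length by omega] at hg
    rw [hg, if_neg (by omega)]
    simp
  termination_by flat.length
  decreasing_by simp only [List.length_drop]; omega


theorem mainB_clean (keys : List String) (hk : keys ≠ []) (flat : List String) :
    (List.range (flat.length / keys.length)).map
        (fun j => mkDictB keys ((flat.drop (j * keys.length)).take keys.length))
      = chunksA keys flat := by
  have hpos : 0 < keys.length := List.length_pos_of_ne_nil hk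
  by_cases h : keys.length ≤ flat.length
  · rw [chunksA, dif_pos ⟨hk, h⟩]
    rw [Nat.div_eq_sub_div hpos h, List.range_succ_eq_map, List.map_cons]
    simp only [Nat.zero_mul, List.drop_zero]
    congr 1
    rw [List.map_map]
    rw [← mainB_clean keys hk (flat.drop keys.length)]
    simp only [List.length_drop]
    congr 1
    funext j
    simp only [Function.comp_apply, Nat.succ_eq_add_one]
    congr 1
    rw [List.drop_drop]
    rw [Nat.succ_mul, Nat.add_comm]
  · rw [chunksA, dif_neg (by intro hc; exact h hc.2)]
    rw [Nat.div_eq_of_lt (by omega)]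
    simp
  termination_by flat.length
  decreasing_by simp only [List.length_drop]; omega

theorem foldl_nil_rows (keys : List String) :
    ∀ (rows : List (List String)),
    (∀ r ∈ rows, r = []) →
    ∀ (init : PySem.Dict String String × List (List (String × String)) × Int),
    rows.foldl (fun st i => i.foldl (aStep keys) st) init = init := by
  intro rows
  induction rows with
  | nil => intro _ init; rfl
  | cons r rs ihr =>
    intro hall init
    rw [List.foldl_cons, hall r (by simp)]
    exact ihr (fun x hx => hall x (by simp [hx])) init


-- ===== VERDICT (by name: the statement is the Claim_ definition above) =====
theorem convertListToJson_spec : Claim_equal_convertListToJson := by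
  intro rows keys _ hpre
  unfold Spec_convertListToJson
  unfold convertListToJson convertListToJson_alt
  by_cases hk : keys = []
  · have hall : ∀ r ∈ rows, r = [] := by
      rcases hpre with h | h
      · exact absurd hk h
      · exact h
    have hflat : rows.flatMap (fun row => row) = [] := by
      simp only [List.flatMap_eq_nil_iff]
      exact hall
    rw [foldl_nil_rows keys rows hall]
    simp [hflat]
  · have hpos : 0 < keys.length := List.length_pos_of_ne_nil hk
    have hA := mainA keys hk rows.flatten [([] : List (String × String))] 0
    rw [show ((0 * keys.length : Nat) : Int) = (0 : Int) by simp] at hA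
    rw [← List.foldl_flatten, hA]
    have hfm : rows.flatMap (fun row => row) = rows.flatten := by simp
    simp only [hfm, List.singleton_append, List.drop_succ_cons, List.drop_zero]
    by_cases hnil : rows.flatten = []
    · rw [if_pos hnil, hnil]
      rw [chunksA, dif_neg (by intro hc; simp at hc)]
    · rw [if_neg hnil]
      rw [← mainB_clean keys hk rows.flatten]
      rw [PySem.Int.floordiv_natCast, PySem.List.pyRange_one]
      simp only [Int.sub_zero, Int.toNat_natCast, List.map_map]
      apply List.map_congr_left
      intro j hj
      simp only [Function.comp_apply]
      congr 1
      rw [show (0 : Int) + (j : Int) = ((j : Nat) : Int) by simp]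
      rw [show ((j : Nat) : Int) * ((keys.length : Nat) : Int) = ((j * keys.length : Nat) : Int) by push_cast; ring]
      rw [PySem.List.slice_natCast_add]
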